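-- pv_equiv track=rewrite | github.com/CaptianJack0001/LangChain-DineGenius | langchain_helper.py | post_process_restaurant_name_and_menu
-- ===== SOURCE A (Python) =====
-- def post_process_restaurant_name_and_menu(restaurant_name, menu_items, cuisine):
--     if cuisine == "Indian":
--         # Apply specific post-processing for Indian cuisine
--         # Add a prefix to the restaurant name
--         restaurant_name = "Saffron Spice " + restaurant_name
--         # Adjust menu items for Indian cuisine (example: replace "tacos" with "samosas")
--         menu_items = [item.replace("tacos", "samosas") for item in menu_items]
--         # Add any other adjustments to menu items if needed
--
--     elif cuisine == "Italian":
--         # Apply specific post-processing for Italian cuisine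
--         # Add a suffix to the restaurant name
--         restaurant_name = restaurant_name + " Bella Vita"
--         # Add any other adjustments to menu items if needed
--         # Example: Replace "burritos" with "pizza"
--         menu_items = [item.replace("burritos", "pizza") for item in menu_items]
--
--     elif cuisine == "Mexican":
--         # Apply specific post-processing for Mexican cuisine
--         # Add a prefix to the restaurant name
--         restaurant_name = "El Mariachi " + restaurant_name
--         # Add any other adjustments to menu items if needed
--         # Example: Replace "pasta" with "enchiladas"
--         menu_items = [item.replace("pasta", "enchiladas") for item in menu_items]
--
--     elif cuisine == "Arabic":
--         # Apply specific post-processing for Arabic cuisine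
--         # Add a suffix to the restaurant name
--         restaurant_name = restaurant_name + " Al Jazeera"
--         # Add any other adjustments to menu items if needed
--         # Example: Replace "hamburger" with "shawarma"
--         menu_items = [item.replace("hamburger", "shawarma") for item in menu_items]
--
--     elif cuisine == "American":
--         # Apply specific post-processing for American cuisine
--         # Add a prefix to the restaurant name
--         restaurant_name = "All-American " + restaurant_name
--         # Add any other adjustments to menu items if needed
--         # Example: Replace "sushi" with "hamburger"
--         menu_items = [item.replace("sushi", "hamburger") for item in menu_items]
--
--     elif cuisine == "French":
--         # Apply specific post-processing for French cuisine
--         # Add a prefix to the restaurant name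
--         restaurant_name = "Le Petit " + restaurant_name
--         # Add any other adjustments to menu items if needed
--         # Example: Replace "tacos" with "croissants"
--         menu_items = [item.replace("tacos", "croissants") for item in menu_items]
--
--     elif cuisine == "Malaysian":
--         # Apply specific post-processing for Malaysian cuisine
--         # Add a suffix to the restaurant name
--         restaurant_name = restaurant_name + " Boleh"
--         # Add any other adjustments to menu items if needed
--         # Example: Replace "steak" with "nasi lemak"
--         menu_items = [item.replace("steak", "nasi lemak") for item in menu_items]
--
--     elif cuisine == "Japanese":
--         # Apply specific post-processing for Japanese cuisine
--         # Add a suffix to the restaurant name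
--         restaurant_name = restaurant_name + " Sushiya"
--         # Add any other adjustments to menu items if needed
--         # Example: Replace "burritos" with "sushi rolls"
--         menu_items = [item.replace("burritos", "sushi rolls") for item in menu_items]
--
--     # Add more cuisine-specific post-processing as needed for other cuisines
--     # ...
--
--     # Return the refined restaurant name and menu items
--     return restaurant_name, menu_items
-- ===== SOURCE B (Python) =====
-- _SEP = "\x00"  # never occurs in printable-ASCII menu items
--
-- _RULES = {
--     "Indian":    ("Saffron Spice ", "",            "tacos",     "samosas"),
--     "Italian":   ("",               " Bella Vita", "burritos",  "pizza"),
--     "Mexican":   ("El Mariachi ",   "",            "pasta",     "enchiladas"),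
--     "Arabic":    ("",               " Al Jazeera", "hamburger", "shawarma"),
--     "American":  ("All-American ",  "",            "sushi",     "hamburger"),
--     "French":    ("Le Petit ",      "",            "tacos",     "croissants"),
--     "Malaysian": ("",               " Boleh",      "steak",     "nasi lemak"),
--     "Japanese":  ("",               " Sushiya",    "burritos",  "sushi rolls"),
-- }
--
-- def post_process_restaurant_name_and_menu(restaurant_name, menu_items, cuisine):
--     rule = _RULES.get(cuisine)
--     if rule is None:
--         return restaurant_name, menu_items
--     pre, suf, old, new = rule
--     # One replace over the sentinel-joined menu instead of a per-item pass:
--     # old/new contain no sentinel, so matches never cross item boundaries.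
--     if menu_items:
--         menu = _SEP.join(menu_items).replace(old, new).split(_SEP)
--     else:
--         menu = []
--     return pre + restaurant_name + suf, menu
-- ===== Notes on version B (the rewrite author's own statement) =====
-- stated objective: alternative
-- what changed: B drops A's per-item replacement loop: it joins the menu items on a '\x00' sentinel, runs a single str.replace over the joined text, and splits back on the sentinel (correct because the replacement patterns are sentinel-free, so matches cannot cross item boundaries); the cuisine rules live in one table instead of an eight-branch ladder.
import Mathlib
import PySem

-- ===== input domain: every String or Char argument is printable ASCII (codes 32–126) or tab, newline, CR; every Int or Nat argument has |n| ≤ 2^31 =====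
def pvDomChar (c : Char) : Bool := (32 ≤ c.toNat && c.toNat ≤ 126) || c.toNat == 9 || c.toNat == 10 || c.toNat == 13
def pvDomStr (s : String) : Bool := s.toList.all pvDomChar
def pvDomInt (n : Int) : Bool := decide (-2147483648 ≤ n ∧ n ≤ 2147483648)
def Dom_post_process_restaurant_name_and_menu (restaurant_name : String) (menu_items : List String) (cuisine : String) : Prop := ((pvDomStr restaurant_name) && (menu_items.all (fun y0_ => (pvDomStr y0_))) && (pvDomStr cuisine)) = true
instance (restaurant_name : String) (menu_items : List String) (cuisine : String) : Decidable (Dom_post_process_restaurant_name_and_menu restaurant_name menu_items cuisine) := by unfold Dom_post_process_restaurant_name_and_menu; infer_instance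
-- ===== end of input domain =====

-- B removes A's per-item replacement loop: it joins the menu on a "\x00" sentinel, performs ONE
-- string replace over the joined text, and splits back (objective: alternative; correct because the
-- replacement patterns contain no sentinel, so matches never cross item boundaries).

-- ===== PORT A =====
def post_process_restaurant_name_and_menu (restaurant_name : String) (menu_items : List String) (cuisine : String) : String × List String :=
  if cuisine = "Indian" then
    ("Saffron Spice " ++ restaurant_name, menu_items.map (fun item => PySem.Str.replace item "tacos" "samosas"))
  else if cuisine = "Italian" then
    (restaurant_name ++ " Bella Vita", menu_items.map (fun item => PySem.Str.replace item "burritos" "pizza"))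
  else if cuisine = "Mexican" then
    ("El Mariachi " ++ restaurant_name, menu_items.map (fun item => PySem.Str.replace item "pasta" "enchiladas"))
  else if cuisine = "Arabic" then
    (restaurant_name ++ " Al Jazeera", menu_items.map (fun item => PySem.Str.replace item "hamburger" "shawarma"))
  else if cuisine = "American" then
    ("All-American " ++ restaurant_name, menu_items.map (fun item => PySem.Str.replace item "sushi" "hamburger"))
  else if cuisine = "French" then
    ("Le Petit " ++ restaurant_name, menu_items.map (fun item => PySem.Str.replace item "tacos" "croissants"))
  else if cuisine = "Malaysian" then
    (restaurant_name ++ " Boleh", menu_items.map (fun item => PySem.Str.replace item "steak" "nasi lemak"))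
  else if cuisine = "Japanese" then
    (restaurant_name ++ " Sushiya", menu_items.map (fun item => PySem.Str.replace item "burritos" "sushi rolls"))
  else
    (restaurant_name, menu_items)

-- ===== PORT B =====
def pvRules : PySem.Dict String (String × String × String × String) := PySem.Dict.ofList
  [("Indian",    ("Saffron Spice ", "",            "tacos",     "samosas")),
   ("Italian",   ("",               " Bella Vita", "burritos",  "pizza")),
   ("Mexican",   ("El Mariachi ",   "",            "pasta",     "enchiladas")),
   ("Arabic",    ("",               " Al Jazeera", "hamburger", "shawarma")),
   ("American",  ("All-American ",  "",            "sushi",     "hamburger")),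
   ("French",    ("Le Petit ",      "",            "tacos",     "croissants")),
   ("Malaysian", ("",               " Boleh",      "steak",     "nasi lemak")),
   ("Japanese",  ("",               " Sushiya",    "burritos",  "sushi rolls"))]

-- sep.join(...).replace(old, new).split(sep): split with a nonempty sep is PySem.Chars.splitOn (exact).
def post_process_restaurant_name_and_menu_alt (restaurant_name : String) (menu_items : List String) (cuisine : String) : String × List String :=
  match PySem.Dict.get? pvRules cuisine with
  | none => (restaurant_name, menu_items)
  | some (pre, suf, old, new) =>
    let menu :=
      if menu_items.isEmpty then []
      else
        (PySem.Chars.splitOn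
          (PySem.Str.replace (PySem.Str.join "\x00" menu_items) old new).toList
          ("\x00" : String).toList).map String.ofList
    (pre ++ restaurant_name ++ suf, menu)

-- ===== PRECONDITION & SPEC =====
def Spec_post_process_restaurant_name_and_menu (restaurant_name : String) (menu_items : List String) (cuisine : String) (out : String × List String) : Prop := out = post_process_restaurant_name_and_menu_alt restaurant_name menu_items cuisine
instance (restaurant_name : String) (menu_items : List String) (cuisine : String) (out : String × List String) : Decidable (Spec_post_process_restaurant_name_and_menu restaurant_name menu_items cuisine out) := by unfold Spec_post_process_restaurant_name_and_menu; infer_instance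

-- ===== CLAIM =====
def Claim_equal_post_process_restaurant_name_and_menu : Prop := ∀ (restaurant_name : String) (menu_items : List String) (cuisine : String), Dom_post_process_restaurant_name_and_menu restaurant_name menu_items cuisine → Spec_post_process_restaurant_name_and_menu restaurant_name menu_items cuisine (post_process_restaurant_name_and_menu restaurant_name menu_items cuisine)

-- ===== LEMMAS AND PROOFS =====
def nulc : Char := Char.ofNat 0

def Rrep (old new : List Char) : List Char → List Char
  | [] => []
  | c :: t =>
    if h : old.isPrefixOf (c :: t) ∧ old ≠ [] then
      new ++ Rrep old new ((c :: t).drop old.length)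
    else c :: Rrep old new t
termination_by l => l.length
decreasing_by
  · simp only [List.length_drop, List.length_cons]
    have : 1 ≤ old.length := by
      cases old with
      | nil => exact absurd rfl h.2
      | cons a b => simp
    omega
  · simp

def Ssplit (sep : List Char) : List Char → List (List Char)
  | [] => [[]]
  | c :: t =>
    if h : sep.isPrefixOf (c :: t) ∧ sep ≠ [] then
      [] :: Ssplit sep ((c :: t).drop sep.length)
    else (Ssplit sep t).modifyHead (c :: ·)
termination_by l => l.length
decreasing_by
  · simp only [List.length_drop, List.length_cons]
    have : 1 ≤ sep.length := by
      cases sep with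
      | nil => exact absurd rfl h.2
      | cons a b => simp
    omega
  · simp

theorem go_spec (old new : List Char) (ho : old ≠ []) :
    ∀ (fuel : Nat) (l acc : List Char), l.length ≤ fuel →
      PySem.Chars.replace.go old new fuel l acc = acc.reverse ++ Rrep old new l := by
  intro fuel
  induction fuel with
  | zero =>
    intro l acc h
    have : l = [] := by cases l <;> simp_all
    subst this
    simp [PySem.Chars.replace.go, Rrep]
  | succ n ih =>
    intro l acc h
    cases l with
    | nil => simp [PySem.Chars.replace.go, Rrep]
    | cons c t =>
      rw [PySem.Chars.replace.go]
      by_cases hp : old.isPrefixOf (c :: t)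
      · rw [if_pos hp, ih _ _ (by
          simp only [List.length_drop, List.length_cons]
          have : 1 ≤ old.length := by cases old with | nil => exact absurd rfl ho | cons a b => simp
          simp at h; omega)]
        rw [Rrep, dif_pos ⟨hp, ho⟩]
        simp
      · rw [if_neg hp, ih _ _ (by simp at h; omega)]
        rw [Rrep, dif_neg (by tauto)]
        simp

theorem replace_eq_Rrep (s old new : List Char) (ho : old ≠ []) :
    PySem.Chars.replace s old new = Rrep old new s := by
  unfold PySem.Chars.replace
  rw [if_neg (by simp [List.isEmpty_iff, ho]), go_spec old new ho s.length s [] le_rfl]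
  simp

theorem split_go_spec (sep : List Char) (hs : sep ≠ []) :
    ∀ (fuel : Nat) (l cur : List Char) (acc : List (List Char)), l.length ≤ fuel →
      PySem.Chars.splitOn.go sep fuel l cur acc
        = acc.reverse ++ (Ssplit sep l).modifyHead (cur.reverse ++ ·) := by
  intro fuel
  induction fuel with
  | zero =>
    intro l cur acc h
    have : l = [] := by cases l <;> simp_all
    subst this
    simp [PySem.Chars.splitOn.go, Ssplit]
  | succ n ih =>
    intro l cur acc h
    cases l with
    | nil => simp [PySem.Chars.splitOn.go, Ssplit]
    | cons c t =>
      rw [PySem.Chars.splitOn.go]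
      by_cases hp : sep.isPrefixOf (c :: t)
      · rw [if_pos hp, ih _ _ _ (by
          simp only [List.length_drop, List.length_cons]
          have : 1 ≤ sep.length := by cases sep with | nil => exact absurd rfl hs | cons a b => simp
          simp at h; omega)]
        rw [Ssplit, dif_pos ⟨hp, hs⟩]
        cases hS : Ssplit sep (List.drop sep.length (c :: t)) <;> simp [hS]
      · rw [if_neg hp, ih _ _ _ (by simp at h; omega)]
        rw [Ssplit, dif_neg (by tauto)]
        cases hS : Ssplit sep t <;> simp [hS]

theorem splitOn_eq_Ssplit (s sep : List Char) (hs : sep ≠ []) :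
    PySem.Chars.splitOn s sep = Ssplit sep s := by
  unfold PySem.Chars.splitOn
  rw [split_go_spec sep hs (s.length + 1) s [] [] (by omega)]
  cases hS : Ssplit sep s <;> simp [List.modifyHead]

theorem prefix_boundary (old a b : List Char) (hn : nulc ∉ old) :
    old.isPrefixOf (a ++ nulc :: b) = old.isPrefixOf a := by
  rw [Bool.eq_iff_iff]
  simp only [List.isPrefixOf_iff_prefix]
  constructor
  · intro hc
    by_cases hl : old.length ≤ a.length
    · exact List.prefix_of_prefix_length_le hc (List.prefix_append a (nulc :: b)) hl
    · exfalso
      apply hn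
      have hi : a.length < old.length := by omega
      have hv : old[a.length]'hi = nulc := by
        rw [hc.getElem hi]
        simp
      rw [← hv]
      exact List.getElem_mem hi
  · intro h
    exact h.trans (List.prefix_append a (nulc :: b))

theorem not_prefix_nul (old : List Char) (ho : old ≠ []) (hno : nulc ∉ old) (b : List Char) :
    ¬ old.isPrefixOf (nulc :: b) = true := by
  intro hp
  rw [List.isPrefixOf_iff_prefix] at hp
  apply hno
  cases old with
  | nil => exact absurd rfl ho
  | cons o t =>
    have : o = nulc := by
      have := hp.getElem (i := 0) (by simp)
      simpa using this
    simp [this]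

theorem Rrep_nul_cons (old new : List Char) (ho : old ≠ []) (hno : nulc ∉ old) (b : List Char) :
    Rrep old new (nulc :: b) = nulc :: Rrep old new b := by
  rw [Rrep, dif_neg (fun hh => not_prefix_nul old ho hno b hh.1)]

theorem Rrep_cross (old new : List Char) (ho : old ≠ []) (hno : nulc ∉ old) :
    ∀ (n : Nat) (a b : List Char), a.length ≤ n → nulc ∉ a →
      Rrep old new (a ++ nulc :: b) = Rrep old new a ++ nulc :: Rrep old new b := by
  intro n
  induction n with
  | zero =>
    intro a b h _
    have : a = [] := by cases a <;> simp_all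
    subst this
    simp only [List.nil_append]
    rw [Rrep_nul_cons old new ho hno b]
    have h0 : Rrep old new [] = [] := by rw [Rrep]
    rw [h0]; rfl
  | succ n ih =>
    intro a b h ha
    cases a with
    | nil =>
      simp only [List.nil_append]
      rw [Rrep_nul_cons old new ho hno b]
      have h0 : Rrep old new [] = [] := by rw [Rrep]
      rw [h0]; rfl
    | cons c t =>
      have hone : 1 ≤ old.length := by cases old with | nil => exact absurd rfl ho | cons x y => simp
      have hpb : old.isPrefixOf (c :: (t ++ nulc :: b)) = old.isPrefixOf (c :: t) := by
        simpa using prefix_boundary old (c :: t) b hno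
      simp only [List.cons_append]
      rw [Rrep]
      simp only [hpb]
      by_cases hp : old.isPrefixOf (c :: t)
      · rw [dif_pos ⟨hp, ho⟩]
        have hple : old.length ≤ (c :: t).length := by
          rw [List.isPrefixOf_iff_prefix] at hp
          exact hp.length_le
        have hdr : List.drop old.length (c :: (t ++ nulc :: b))
            = List.drop old.length (c :: t) ++ nulc :: b := by
          rw [show c :: (t ++ nulc :: b) = (c :: t) ++ nulc :: b by simp,
              List.drop_append_of_le_length hple]
        rw [hdr, ih (List.drop old.length (c :: t)) b (by simp at h ⊢; omega)
            (fun hm => ha (List.drop_subset _ _ hm))]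
        rw [Rrep, dif_pos ⟨hp, ho⟩]
        simp
      · rw [dif_neg (by tauto)]
        rw [ih t b (by simp at h; omega) (fun hm => ha (List.mem_cons_of_mem c hm))]
        rw [Rrep, dif_neg (by tauto)]
        simp

theorem Rrep_nul_free (old new : List Char) (hn : nulc ∉ new) :
    ∀ (n : Nat) (a : List Char), a.length ≤ n → nulc ∉ a → nulc ∉ Rrep old new a := by
  intro n
  induction n with
  | zero =>
    intro a h _
    have : a = [] := by cases a <;> simp_all
    subst this
    rw [Rrep]; simp
  | succ n ih =>
    intro a h ha
    cases a with
    | nil => rw [Rrep]; simp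
    | cons c t =>
      have hone : old ≠ [] → 1 ≤ old.length := by
        intro ho; cases old with | nil => exact absurd rfl ho | cons x y => simp
      rw [Rrep]
      by_cases hp : old.isPrefixOf (c :: t) ∧ old ≠ []
      · rw [dif_pos hp]
        intro hm
        rcases List.mem_append.1 hm with hm | hm
        · exact hn hm
        · exact ih (List.drop old.length (c :: t)) (by
            have := hone hp.2
            simp at h ⊢; omega) (fun x => ha (List.drop_subset _ _ x)) hm
      · rw [dif_neg hp]
        intro hm
        rcases List.mem_cons.1 hm with hm | hm
        · exact ha (by simp [hm])
        · exact ih t (by simp at h; omega) (fun x => ha (List.mem_cons_of_mem c x)) hm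

theorem Ssplit_nul_free (x : List Char) (hx : nulc ∉ x) : Ssplit [nulc] x = [x] := by
  induction x with
  | nil => rw [Ssplit]
  | cons c t ih =>
    rw [Ssplit, dif_neg (by
      rintro ⟨hp, -⟩
      rw [List.isPrefixOf_iff_prefix] at hp
      apply hx
      have : c = nulc := by
        have := hp.getElem (i := 0) (by simp)
        simpa using this.symm
      simp [this])]
    rw [ih (fun hm => hx (List.mem_cons_of_mem c hm))]
    rfl

theorem Ssplit_cross (x r : List Char) (hx : nulc ∉ x) :
    Ssplit [nulc] (x ++ nulc :: r) = x :: Ssplit [nulc] r := by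
  induction x with
  | nil =>
    simp only [List.nil_append]
    rw [Ssplit, dif_pos ⟨by simp [List.isPrefixOf], by simp⟩]
    simp
  | cons c t ih =>
    simp only [List.cons_append]
    rw [Ssplit, dif_neg (by
      rintro ⟨hp, -⟩
      rw [List.isPrefixOf_iff_prefix] at hp
      apply hx
      have : c = nulc := by
        have := hp.getElem (i := 0) (by simp)
        simpa using this.symm
      simp [this])]
    rw [ih (fun hm => hx (List.mem_cons_of_mem c hm))]
    rfl

theorem main_chars (old new : List Char) (ho : old ≠ []) (hno : nulc ∉ old) (hnn : nulc ∉ new) :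
    ∀ (ls : List (List Char)), ls ≠ [] → (∀ x ∈ ls, nulc ∉ x) →
      Ssplit [nulc] (Rrep old new (List.intercalate [nulc] ls)) = ls.map (Rrep old new) := by
  intro ls
  induction ls with
  | nil => intro h; exact absurd rfl h
  | cons x xs ih =>
    intro _ hmem
    cases xs with
    | nil =>
      rw [show List.intercalate [nulc] [x] = x by simp [List.intercalate]]
      simpa using Ssplit_nul_free _ (Rrep_nul_free old new hnn x.length x le_rfl (hmem x (by simp)))
    | cons y rest =>
      have hx : nulc ∉ x := hmem x (by simp)
      have hic : List.intercalate [nulc] (x :: y :: rest)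
          = x ++ nulc :: List.intercalate [nulc] (y :: rest) := by
        simp [List.intercalate, List.intersperse]
      rw [hic, Rrep_cross old new ho hno _ x _ le_rfl hx,
          Ssplit_cross _ _ (Rrep_nul_free old new hnn x.length x le_rfl hx),
          ih (by simp) (fun z hz => hmem z (by simp [hz]))]
      rfl

theorem dom_str_nul_free (s : String) (h : pvDomStr s = true) : nulc ∉ s.toList := by
  intro hm
  have := List.all_eq_true.1 h nulc hm
  simp [pvDomChar, nulc] at this

theorem rule_menu (old new : String) (ho : old.toList ≠ []) (h1 : nulc ∉ old.toList)
    (h2 : nulc ∉ new.toList) (mi : List String) (hmi : ∀ s ∈ mi, nulc ∉ s.toList) :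
    (if mi.isEmpty then ([] : List String)
     else
       (PySem.Chars.splitOn
         (PySem.Str.replace (PySem.Str.join "\x00" mi) old new).toList
         ("\x00" : String).toList).map String.ofList)
    = mi.map (fun item => PySem.Str.replace item old new) := by
  cases mi with
  | nil => simp
  | cons m rest =>
    rw [if_neg (by simp)]
    have hsep : ("\x00" : String).toList = [nulc] := by decide
    rw [PySem.Str.toList_replace, PySem.Str.toList_join, hsep]
    unfold PySem.Chars.join
    rw [replace_eq_Rrep _ _ _ ho,
        splitOn_eq_Ssplit _ _ (by simp),
        main_chars old.toList new.toList ho h1 h2 ((m :: rest).map String.toList)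
          (by simp)
          (by
            intro x hx
            rw [List.mem_map] at hx
            obtain ⟨s, hs, rfl⟩ := hx
            exact hmi s hs)]
    simp only [List.map_map]
    apply List.map_congr_left
    intro s _
    simp only [Function.comp]
    rw [PySem.Str.replace, replace_eq_Rrep _ _ _ ho]

theorem get_rules_none (cu : String)
    (h1 : ¬ cu = "Indian") (h2 : ¬ cu = "Italian") (h3 : ¬ cu = "Mexican")
    (h4 : ¬ cu = "Arabic") (h5 : ¬ cu = "American") (h6 : ¬ cu = "French")
    (h7 : ¬ cu = "Malaysian") (h8 : ¬ cu = "Japanese") :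
    PySem.Dict.get? pvRules cu = none := by
  rw [show pvRules = PySem.Dict.mk
    [("Indian",    ("Saffron Spice ", "",            "tacos",     "samosas")),
     ("Italian",   ("",               " Bella Vita", "burritos",  "pizza")),
     ("Mexican",   ("El Mariachi ",   "",            "pasta",     "enchiladas")),
     ("Arabic",    ("",               " Al Jazeera", "hamburger", "shawarma")),
     ("American",  ("All-American ",  "",            "sushi",     "hamburger")),
     ("French",    ("Le Petit ",      "",            "tacos",     "croissants")),
     ("Malaysian", ("",               " Boleh",      "steak",     "nasi lemak")),
     ("Japanese",  ("",               " Sushiya",    "burritos",  "sushi rolls"))] from rfl]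
  simp [PySem.Dict.get?, Ne.symm h1, Ne.symm h2, Ne.symm h3, Ne.symm h4,
        Ne.symm h5, Ne.symm h6, Ne.symm h7, Ne.symm h8]

-- ===== VERDICT =====
theorem post_process_restaurant_name_and_menu_spec : Claim_equal_post_process_restaurant_name_and_menu := by
  intro rn mi cu hdom
  unfold Spec_post_process_restaurant_name_and_menu
  have hmi : ∀ s ∈ mi, nulc ∉ s.toList := by
    intro s hs
    unfold Dom_post_process_restaurant_name_and_menu at hdom
    simp only [Bool.and_eq_true] at hdom
    exact dom_str_nul_free s (List.all_eq_true.1 hdom.1.2 s hs)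
  by_cases c1 : cu = "Indian"
  · subst c1
    unfold post_process_restaurant_name_and_menu post_process_restaurant_name_and_menu_alt
    rw [show PySem.Dict.get? pvRules "Indian" = some ("Saffron Spice ", "", "tacos", "samosas") from rfl]
    simp only [reduceIte]
    refine Prod.ext (by simp) ?_
    exact (rule_menu _ _ (by decide) (by decide) (by decide) mi hmi).symm
  by_cases c2 : cu = "Italian"
  · subst c2
    unfold post_process_restaurant_name_and_menu post_process_restaurant_name_and_menu_alt
    rw [show PySem.Dict.get? pvRules "Italian" = some ("", " Bella Vita", "burritos", "pizza") from rfl]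
    simp only [reduceIte]
    refine Prod.ext (by simp) ?_
    exact (rule_menu _ _ (by decide) (by decide) (by decide) mi hmi).symm
  by_cases c3 : cu = "Mexican"
  · subst c3
    unfold post_process_restaurant_name_and_menu post_process_restaurant_name_and_menu_alt
    rw [show PySem.Dict.get? pvRules "Mexican" = some ("El Mariachi ", "", "pasta", "enchiladas") from rfl]
    simp only [reduceIte]
    refine Prod.ext (by simp) ?_
    exact (rule_menu _ _ (by decide) (by decide) (by decide) mi hmi).symm
  by_cases c4 : cu = "Arabic"
  · subst c4
    unfold post_process_restaurant_name_and_menu post_process_restaurant_name_and_menu_alt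
    rw [show PySem.Dict.get? pvRules "Arabic" = some ("", " Al Jazeera", "hamburger", "shawarma") from rfl]
    simp only [reduceIte]
    refine Prod.ext (by simp) ?_
    exact (rule_menu _ _ (by decide) (by decide) (by decide) mi hmi).symm
  by_cases c5 : cu = "American"
  · subst c5
    unfold post_process_restaurant_name_and_menu post_process_restaurant_name_and_menu_alt
    rw [show PySem.Dict.get? pvRules "American" = some ("All-American ", "", "sushi", "hamburger") from rfl]
    simp only [reduceIte]
    refine Prod.ext (by simp) ?_
    exact (rule_menu _ _ (by decide) (by decide) (by decide) mi hmi).symm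
  by_cases c6 : cu = "French"
  · subst c6
    unfold post_process_restaurant_name_and_menu post_process_restaurant_name_and_menu_alt
    rw [show PySem.Dict.get? pvRules "French" = some ("Le Petit ", "", "tacos", "croissants") from rfl]
    simp only [reduceIte]
    refine Prod.ext (by simp) ?_
    exact (rule_menu _ _ (by decide) (by decide) (by decide) mi hmi).symm
  by_cases c7 : cu = "Malaysian"
  · subst c7
    unfold post_process_restaurant_name_and_menu post_process_restaurant_name_and_menu_alt
    rw [show PySem.Dict.get? pvRules "Malaysian" = some ("", " Boleh", "steak", "nasi lemak") from rfl]
    simp only [reduceIte]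
    refine Prod.ext (by simp) ?_
    exact (rule_menu _ _ (by decide) (by decide) (by decide) mi hmi).symm
  by_cases c8 : cu = "Japanese"
  · subst c8
    unfold post_process_restaurant_name_and_menu post_process_restaurant_name_and_menu_alt
    rw [show PySem.Dict.get? pvRules "Japanese" = some ("", " Sushiya", "burritos", "sushi rolls") from rfl]
    simp only [reduceIte]
    refine Prod.ext (by simp) ?_
    exact (rule_menu _ _ (by decide) (by decide) (by decide) mi hmi).symm
  unfold post_process_restaurant_name_and_menu post_process_restaurant_name_and_menu_alt
  rw [get_rules_none cu c1 c2 c3 c4 c5 c6 c7 c8]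
  simp [c1, c2, c3, c4, c5, c6, c7, c8]
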